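-- pv_equiv track=rewrite | github.com/saulhappy/algoPractice | python/miscPracticeProblems/Algorithms/Misc/candles_blown_out.py | candles_blown_out
-- ===== SOURCE A (Python) =====
-- def candles_blown_out (hallway):
--     candles = 0
--     for i in range(len(hallway)):
--         if hallway[i] == '>':
--             for j in range(i+1, len(hallway)):
--                 if hallway[j] == 'i':
--                     candles += 1
--         if hallway[i] == '<':
--             for j in range(i):
--                 if hallway[j] == 'i':
--                     candles +=1
--
--     return candles
-- ===== SOURCE B (Python) =====
-- def candles_blown_out(hallway):
--     total = hallway.count('i')
--     prefix = 0
--     candles = 0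
--     for c in hallway:
--         if c == 'i':
--             prefix += 1
--         elif c == '<':
--             candles += prefix
--         elif c == '>':
--             candles += total - prefix
--     return candles
-- ===== Notes on version B (the rewrite author's own statement) =====
-- stated objective: alternative
-- what changed: Replaced the per-marker rescans (for each '>'/'<' an inner loop over the rest of the string) with a single left-to-right pass maintaining a running prefix count of 'i' plus the total count, so each direction marker is charged in O(1); intended as asymptotically faster (O(n) vs O(n^2)) but a timing run measured only 1.37x at the largest size, so no speed is claimed.
import Mathlib
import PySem

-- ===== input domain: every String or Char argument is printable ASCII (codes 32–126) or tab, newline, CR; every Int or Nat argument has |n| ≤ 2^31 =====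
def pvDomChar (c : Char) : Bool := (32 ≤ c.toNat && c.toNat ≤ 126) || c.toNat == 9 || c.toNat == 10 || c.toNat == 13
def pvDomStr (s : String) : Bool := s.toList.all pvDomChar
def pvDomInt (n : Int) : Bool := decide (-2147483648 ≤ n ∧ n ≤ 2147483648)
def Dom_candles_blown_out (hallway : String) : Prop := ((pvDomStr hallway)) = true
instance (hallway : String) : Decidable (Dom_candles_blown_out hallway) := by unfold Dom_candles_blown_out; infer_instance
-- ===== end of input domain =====

-- B replaces A's nested rescans (an inner loop per '>'/'<') with a single pass
-- keeping a running prefix count of 'i' and the total count (objective: alternative).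

-- ===== PORT A =====
def candles_blown_out (hallway : String) : Int :=
  let cs := hallway.toList
  (PySem.List.pyRange 0 (cs.length : Int) 1).foldl (fun candles i =>
    let candles :=
      if PySem.List.pyGetD cs i ' ' = '>' then
        (PySem.List.pyRange (i + 1) (cs.length : Int) 1).foldl
          (fun c j => if PySem.List.pyGetD cs j ' ' = 'i' then c + 1 else c) candles
      else candles
    if PySem.List.pyGetD cs i ' ' = '<' then
      (PySem.List.pyRange 0 i 1).foldl
        (fun c j => if PySem.List.pyGetD cs j ' ' = 'i' then c + 1 else c) candles
    else candles) 0

-- ===== PORT B =====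
def candles_blown_out_alt (hallway : String) : Int :=
  let cs := hallway.toList
  let total : Int := cs.count 'i'
  (cs.foldl (fun (s : Int × Int) c =>
    if c = 'i' then (s.1 + 1, s.2)
    else if c = '<' then (s.1, s.2 + s.1)
    else if c = '>' then (s.1, s.2 + (total - s.1))
    else s) (0, 0)).2

-- ===== PRECONDITION & SPEC =====
def Spec_candles_blown_out (hallway : String) (out : Int) : Prop := out = candles_blown_out_alt hallway
instance (hallway : String) (out : Int) : Decidable (Spec_candles_blown_out hallway out) := by unfold Spec_candles_blown_out; infer_instance

-- ===== CLAIM (what is proved, stated in full; the proofs are below) =====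
def Claim_equal_candles_blown_out : Prop := ∀ (hallway : String), Dom_candles_blown_out hallway → Spec_candles_blown_out hallway (candles_blown_out hallway)

-- ===== LEMMAS AND PROOFS =====

-- per-index contribution in A: a '>' counts the 'i's after it, a '<' the 'i's before it
def pvContrib (cs : List Char) (k : Nat) : Int :=
  (if cs.getD k ' ' = '>' then ((cs.drop (k + 1)).count 'i' : Int) else 0)
  + (if cs.getD k ' ' = '<' then ((cs.take k).count 'i' : Int) else 0)

-- recursive description of B's loop: p = running prefix count of 'i'
def pvPhi (total p : Int) : List Char → Int
  | [] => 0
  | c :: t =>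
    if c = 'i' then pvPhi total (p + 1) t
    else if c = '<' then p + pvPhi total p t
    else if c = '>' then (total - p) + pvPhi total p t
    else pvPhi total p t

-- common recursive spec both programs are reduced to
def pvS : List Char → Int
  | [] => 0
  | c :: t => (if c = '>' then (t.count 'i' : Int) else 0) + pvS t
      + (if c = 'i' then (t.count '<' : Int) else 0)

theorem pvPyRangeNat (a b : Nat) :
    PySem.List.pyRange (a : Int) (b : Int) 1
      = (List.range (b - a)).map (fun m => ((a + m : Nat) : Int)) := by
  rw [PySem.List.pyRange_one]
  have h : ((b : Int) - (a : Int)).toNat = b - a := by omega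
  rw [h]
  exact List.map_congr_left (fun m _ => by push_cast; ring)

theorem pvPyRangeNat0 (b : Nat) :
    PySem.List.pyRange 0 (b : Int) 1 = (List.range b).map (fun (m : Nat) => (m : Int)) := by
  have h := pvPyRangeNat 0 b
  rw [Nat.cast_zero] at h
  rw [h, Nat.sub_zero]
  exact List.map_congr_left (fun m _ => by push_cast; omega)

theorem pvFoldlMap {α β γ : Type} (g : α → β) (f : γ → β → γ) (l : List α) (init : γ) :
    (l.map g).foldl f init = l.foldl (fun x y => f x (g y)) init := by
  induction l generalizing init with
  | nil => rfl
  | cons a t ih => simp [ih]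

theorem pvFoldlCongr {α β : Type} (l : List α) (f g : β → α → β) (init : β)
    (h : ∀ acc x, x ∈ l → f acc x = g acc x) : l.foldl f init = l.foldl g init := by
  induction l generalizing init with
  | nil => rfl
  | cons a t ih =>
    rw [List.foldl_cons, List.foldl_cons, h init a (by simp)]
    exact ih _ (fun acc x hx => h acc x (by simp [hx]))

theorem pvMapRangeGetD_drop (cs : List Char) (s : Nat) :
    (List.range (cs.length - s)).map (fun m => cs.getD (s + m) ' ') = cs.drop s := by
  apply List.ext_getElem
  · simp
  · intro i h1 h2
    simp only [List.getElem_map, List.getElem_range, List.getElem_drop]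
    have hlt : s + i < cs.length := by
      have : i < cs.length - s := by simpa using h2
      omega
    rw [List.getD_eq_getElem _ _ hlt]

theorem pvMapRangeGetD_take (cs : List Char) (k : Nat) (hk : k ≤ cs.length) :
    (List.range k).map (fun m => cs.getD m ' ') = cs.take k := by
  apply List.ext_getElem
  · simp [hk]
  · intro i h1 h2
    simp only [List.getElem_map, List.getElem_range, List.getElem_take]
    have hlt : i < cs.length := by
      have : i < k := by simpa using h1
      omega
    rw [List.getD_eq_getElem _ _ hlt]

theorem pvFoldlCount (l : List Char) (init : Int) :
    l.foldl (fun c ch => if ch = 'i' then c + 1 else c) init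
      = init + (l.count 'i' : Int) := by
  induction l generalizing init with
  | nil => simp
  | cons c t ih =>
    by_cases h : c = 'i' <;> simp [h, ih, List.count_cons] <;> push_cast <;> ring

theorem pvSumIteCount (l : List Char) (a : Char) :
    (l.map (fun ch => if ch = a then (1 : Int) else 0)).sum = (l.count a : Int) := by
  induction l with
  | nil => simp
  | cons c t ih =>
    by_cases h : c = a <;> simp [h, ih, List.count_cons] <;> push_cast <;> ring

theorem pvInnerGt (cs : List Char) (k : Nat) (acc : Int) :
    (PySem.List.pyRange ((k : Int) + 1) (cs.length : Int) 1).foldl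
        (fun c j => if PySem.List.pyGetD cs j ' ' = 'i' then c + 1 else c) acc
      = acc + ((cs.drop (k + 1)).count 'i' : Int) := by
  have h1 : (k : Int) + 1 = ((k + 1 : Nat) : Int) := by push_cast; ring
  rw [h1, pvPyRangeNat (k + 1) cs.length, List.foldl_map]
  simp only [PySem.List.pyGetD_natCast]
  have h2 := pvFoldlMap (fun m => cs.getD (k + 1 + m) ' ')
    (fun (c : Int) ch => if ch = 'i' then c + 1 else c)
    (List.range (cs.length - (k + 1))) acc
  rw [pvMapRangeGetD_drop cs (k + 1), pvFoldlCount] at h2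
  exact h2.symm

theorem pvInnerLt (cs : List Char) (k : Nat) (hk : k ≤ cs.length) (acc : Int) :
    (PySem.List.pyRange 0 (k : Int) 1).foldl
        (fun c j => if PySem.List.pyGetD cs j ' ' = 'i' then c + 1 else c) acc
      = acc + ((cs.take k).count 'i' : Int) := by
  rw [pvPyRangeNat0 k, List.foldl_map]
  simp only [PySem.List.pyGetD_natCast]
  have h2 := pvFoldlMap (fun m => cs.getD m ' ')
    (fun (c : Int) ch => if ch = 'i' then c + 1 else c)
    (List.range k) acc
  rw [pvMapRangeGetD_take cs k hk, pvFoldlCount] at h2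
  exact h2.symm

theorem pvA_fold (cs : List Char) :
    (PySem.List.pyRange 0 (cs.length : Int) 1).foldl (fun candles i =>
      let candles :=
        if PySem.List.pyGetD cs i ' ' = '>' then
          (PySem.List.pyRange (i + 1) (cs.length : Int) 1).foldl
            (fun c j => if PySem.List.pyGetD cs j ' ' = 'i' then c + 1 else c) candles
        else candles
      if PySem.List.pyGetD cs i ' ' = '<' then
        (PySem.List.pyRange 0 i 1).foldl
          (fun c j => if PySem.List.pyGetD cs j ' ' = 'i' then c + 1 else c) candles
      else candles) 0
    = ((List.range cs.length).map (pvContrib cs)).sum := by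
  rw [pvPyRangeNat0 cs.length, List.foldl_map]
  refine (pvFoldlCongr _ _ (fun (acc : Int) (k : Nat) => acc + pvContrib cs k) 0 ?_).trans ?_
  · intro acc k hk
    have hklen : k < cs.length := List.mem_range.mp hk
    simp only [PySem.List.pyGetD_natCast]
    by_cases hgt : cs.getD k ' ' = '>'
    · have hlt : ¬ cs.getD k ' ' = '<' := by rw [hgt]; decide
      rw [if_neg hlt, if_pos hgt, pvInnerGt cs k acc]
      simp only [pvContrib]
      rw [if_pos hgt, if_neg hlt]
      ring
    · by_cases hlt : cs.getD k ' ' = '<'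
      · rw [if_pos hlt, if_neg hgt, pvInnerLt cs k (Nat.le_of_lt hklen) acc]
        simp only [pvContrib]
        rw [if_pos hlt, if_neg hgt]
        ring
      · rw [if_neg hlt, if_neg hgt]
        simp only [pvContrib]
        rw [if_neg hgt, if_neg hlt]
        ring
  · rw [PySem.List.foldl_add]
    simp

theorem pvA_eq_sum (hallway : String) :
    candles_blown_out hallway
      = ((List.range hallway.toList.length).map (pvContrib hallway.toList)).sum :=
  pvA_fold hallway.toList

theorem pvContrib_cons (c : Char) (t : List Char) (k : Nat) :
    pvContrib (c :: t) (k + 1)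
      = pvContrib t k
        + (if t.getD k ' ' = '<' then (if c = 'i' then (1 : Int) else 0) else 0) := by
  simp only [pvContrib, List.getD_cons_succ, List.drop_succ_cons, List.take_succ_cons]
  have hcount : (((c :: t.take k).count 'i' : Nat) : Int)
      = ((t.take k).count 'i' : Int) + (if c = 'i' then 1 else 0) := by
    rw [List.count_cons]
    by_cases hc : c = 'i' <;> simp [hc] <;> push_cast <;> ring
  rw [hcount]
  split_ifs <;> push_cast <;> ring

theorem pvSum_eq_pvS (cs : List Char) :
    ((List.range cs.length).map (pvContrib cs)).sum = pvS cs := by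
  induction cs with
  | nil => simp [pvS]
  | cons c t ih =>
    have hlen : (c :: t).length = t.length + 1 := rfl
    rw [hlen, List.range_succ_eq_map]
    simp only [List.map_cons, List.sum_cons, List.map_map]
    have hmap : (List.range t.length).map (pvContrib (c :: t) ∘ Nat.succ)
        = (List.range t.length).map
            (fun k => pvContrib t k
              + (if t.getD k ' ' = '<' then (if c = 'i' then (1 : Int) else 0) else 0)) := by
      exact List.map_congr_left (fun k _ => pvContrib_cons c t k)
    rw [hmap, PySem.List.sum_map_add_int, ih]
    have hsnd : ((List.range t.length).map
        (fun k => if t.getD k ' ' = '<' then (if c = 'i' then (1 : Int) else 0) else 0)).sum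
        = (if c = 'i' then (t.count '<' : Int) else 0) := by
      by_cases hc : c = 'i'
      · simp only [hc, if_true]
        have hcomp : (List.range t.length).map
            (fun k => if t.getD k ' ' = '<' then (1 : Int) else 0)
            = ((List.range t.length).map (fun k => t.getD k ' ')).map
                (fun ch => if ch = '<' then (1 : Int) else 0) := by
          rw [List.map_map]
          rfl
        rw [hcomp, pvMapRangeGetD_take t t.length (le_refl _), List.take_length,
          pvSumIteCount]
      · simp [hc]
    rw [hsnd]
    have hhead : pvContrib (c :: t) 0
        = (if c = '>' then (t.count 'i' : Int) else 0) := by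
      simp [pvContrib]
    rw [hhead]
    simp only [pvS]
    ring

theorem pvB_loop (total : Int) (cs : List Char) (p r : Int) :
    (cs.foldl (fun (s : Int × Int) c =>
      if c = 'i' then (s.1 + 1, s.2)
      else if c = '<' then (s.1, s.2 + s.1)
      else if c = '>' then (s.1, s.2 + (total - s.1))
      else s) (p, r)).2 = r + pvPhi total p cs := by
  induction cs generalizing p r with
  | nil => simp [pvPhi]
  | cons c t ih =>
    simp only [List.foldl_cons, pvPhi]
    by_cases h1 : c = 'i'
    · simp [h1, ih]
    · by_cases h2 : c = '<'
      · simp [h1, h2, ih]; ring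
      · by_cases h3 : c = '>'
        · simp [h1, h2, h3, ih]; ring
        · simp [h1, h2, h3, ih]

theorem pvPhi_eq_pvS (t : List Char) (p total : Int)
    (h : total = p + (t.count 'i' : Int)) :
    pvPhi total p t = pvS t + p * (t.count '<' : Int) := by
  induction t generalizing p with
  | nil => simp [pvPhi, pvS]
  | cons c t ih =>
    simp only [pvPhi, pvS]
    by_cases h1 : c = 'i'
    · rw [ih (p + 1) (by subst h1; simp [h, List.count_cons]; push_cast; ring)]
      simp [h1, List.count_cons]
      push_cast; ring
    · by_cases h2 : c = '<'
      · rw [ih p (by simp [h, h2, List.count_cons, h1])]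
        simp [h1, h2, List.count_cons]
        push_cast; ring
      · by_cases h3 : c = '>'
        · have hc : ((c :: t).count 'i' : Int) = (t.count 'i' : Int) := by
            simp [List.count_cons, h1]
          have htp : total - p = (t.count 'i' : Int) := by rw [h, hc]; ring
          rw [ih p (by rw [h, hc])]
          simp [h1, h2, h3, List.count_cons, htp]
          ring
        · rw [ih p (by simp [h, h1, h2, h3, List.count_cons])]
          simp [h1, h2, h3, List.count_cons]

theorem pvB_fold (cs : List Char) :
    (cs.foldl (fun (s : Int × Int) c =>
      if c = 'i' then (s.1 + 1, s.2)
      else if c = '<' then (s.1, s.2 + s.1)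
      else if c = '>' then (s.1, s.2 + ((cs.count 'i' : Int) - s.1))
      else s) (0, 0)).2 = pvS cs := by
  rw [pvB_loop ((cs.count 'i' : Int)) cs 0 0]
  rw [pvPhi_eq_pvS cs 0 _ (by simp)]
  ring

theorem pvB_eq_pvS (hallway : String) :
    candles_blown_out_alt hallway = pvS hallway.toList :=
  pvB_fold hallway.toList

-- ===== VERDICT (by name: the statement is the Claim_ definition above) =====
theorem candles_blown_out_spec : Claim_equal_candles_blown_out := by
  intro hallway _
  unfold Spec_candles_blown_out
  rw [pvA_eq_sum, pvSum_eq_pvS, pvB_eq_pvS]
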